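-- pv_equiv track=rewrite | github.com/aplotlib/PriceAnalysis9000 | pdf_analyzer.py | _map_table_columns
-- ===== SOURCE A (Python) =====
-- from typing import Dict, List, Any, Optional, Tuple
--
-- def _map_table_columns(headers: List[str]) -> Dict[str, int]:
--     """Map table headers to standardized field names"""
--     column_map = {}
--
--     # Define header mappings
--     header_mappings = {
--         'order_id': ['order id', 'order-id', 'order number', 'order#'],
--         'asin': ['asin', 'product asin'],
--         'sku': ['sku', 'seller sku', 'merchant sku'],
--         'return_date': ['return date', 'returned date', 'date returned', 'date'],
--         'return_reason': ['return reason', 'reason', 'return type', 'issue'],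
--         'buyer_comment': ['customer comment', 'buyer comment', 'comment', 'feedback', 'notes'],
--         'product_name': ['product name', 'product', 'item name', 'description'],
--         'quantity': ['quantity', 'qty', 'units']
--     }
--
--     # Map headers
--     for field, patterns in header_mappings.items():
--         for idx, header in enumerate(headers):
--             if header in patterns:
--                 column_map[field] = idx
--                 break
--
--     return column_map
-- ===== SOURCE B (Python) =====
-- from typing import Dict, List, Any, Optional, Tuple
--
-- def _map_table_columns(headers: List[str]) -> Dict[str, int]:
--     """Map table headers to standardized field names"""
--     header_mappings = {
--         'order_id': ['order id', 'order-id', 'order number', 'order#'],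
--         'asin': ['asin', 'product asin'],
--         'sku': ['sku', 'seller sku', 'merchant sku'],
--         'return_date': ['return date', 'returned date', 'date returned', 'date'],
--         'return_reason': ['return reason', 'reason', 'return type', 'issue'],
--         'buyer_comment': ['customer comment', 'buyer comment', 'comment', 'feedback', 'notes'],
--         'product_name': ['product name', 'product', 'item name', 'description'],
--         'quantity': ['quantity', 'qty', 'units']
--     }
--     # one reverse lookup table, then a single pass over the headers
--     reverse = {p: f for f, ps in header_mappings.items() for p in ps}
--     found = {}
--     for idx, header in enumerate(headers):
--         field = reverse.get(header)
--         if field is not None and field not in found: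
--             found[field] = idx
--     # emit in canonical field order (same dict order as the fields-outer loop)
--     return {f: found[f] for f in header_mappings if f in found}
-- ===== Notes on version B (the rewrite author's own statement) =====
-- stated objective: faster
-- what changed: Replaces A's fields-outer loop (which rescans the headers list once per field, testing membership in a pattern list each time) by a reverse pattern-to-field lookup table built once and a single hash-lookup pass over the headers, emitting the result in canonical field order.
import Mathlib
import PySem

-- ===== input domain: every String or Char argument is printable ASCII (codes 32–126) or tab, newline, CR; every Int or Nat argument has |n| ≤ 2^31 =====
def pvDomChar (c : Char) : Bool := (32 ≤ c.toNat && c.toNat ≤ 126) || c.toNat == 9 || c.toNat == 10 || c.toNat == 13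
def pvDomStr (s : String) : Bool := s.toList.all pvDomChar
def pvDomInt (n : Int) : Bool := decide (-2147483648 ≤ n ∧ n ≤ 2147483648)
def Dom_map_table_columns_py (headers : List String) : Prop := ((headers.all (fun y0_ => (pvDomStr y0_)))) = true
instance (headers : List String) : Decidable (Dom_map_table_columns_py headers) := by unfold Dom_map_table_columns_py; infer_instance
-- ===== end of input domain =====

-- B replaces A's fields-outer loop (one scan of the headers per field) by one reverse
-- pattern→field table and a single pass over the headers; objective: alternative.

-- the literal `header_mappings` table both Pythons contain, in its insertion order
def pvHeaderMappings : List (String × List String) :=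
  [("order_id", ["order id", "order-id", "order number", "order#"]),
   ("asin", ["asin", "product asin"]),
   ("sku", ["sku", "seller sku", "merchant sku"]),
   ("return_date", ["return date", "returned date", "date returned", "date"]),
   ("return_reason", ["return reason", "reason", "return type", "issue"]),
   ("buyer_comment", ["customer comment", "buyer comment", "comment", "feedback", "notes"]),
   ("product_name", ["product name", "product", "item name", "description"]),
   ("quantity", ["quantity", "qty", "units"])]

-- ===== PORT A =====
-- A's inner `for idx, header in enumerate(headers): if header in patterns: …; break`
def pvScanA (cm : PySem.Dict String Int) (f : String) (ps : List String) :
    List String → Int → PySem.Dict String Int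
  | [], _ => cm
  | h :: t, i => if ps.contains h then cm.insert f i else pvScanA cm f ps t (i + 1)

def map_table_columns_py (headers : List String) : List (String × Int) :=
  (pvHeaderMappings.foldl (fun cm fp => pvScanA cm fp.1 fp.2 headers 0) PySem.Dict.empty).items

-- ===== PORT B =====
-- `reverse = {p: f for f, ps in header_mappings.items() for p in ps}`
def pvReverse : PySem.Dict String String :=
  pvHeaderMappings.foldl (fun d fp => fp.2.foldl (fun d p => d.insert p fp.1) d) PySem.Dict.empty

-- B's single pass `for idx, header in enumerate(headers): …`
def pvScanB (fd : PySem.Dict String Int) :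
    List String → Int → PySem.Dict String Int
  | [], _ => fd
  | h :: t, i =>
      pvScanB (match pvReverse.get? h with
               | some f => if fd.contains f then fd else fd.insert f i
               | none => fd) t (i + 1)

def map_table_columns_py_alt (headers : List String) : List (String × Int) :=
  let found := pvScanB PySem.Dict.empty headers 0
  (pvHeaderMappings.foldl (fun cm fp =>
      match found.get? fp.1 with
      | some i => cm.insert fp.1 i
      | none => cm) PySem.Dict.empty).items

-- ===== PRECONDITION & SPEC =====
def Spec_map_table_columns_py (headers : List String) (out : List (String × Int)) : Prop := out = map_table_columns_py_alt headers
instance (headers : List String) (out : List (String × Int)) : Decidable (Spec_map_table_columns_py headers out) := by unfold Spec_map_table_columns_py; infer_instance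

-- ===== CLAIM (what is proved, stated in full; the proofs are below) =====
def Claim_equal_map_table_columns_py : Prop := ∀ (headers : List String), Dom_map_table_columns_py headers → Spec_map_table_columns_py headers (map_table_columns_py headers)

-- ===== LEMMAS AND PROOFS =====

-- first index i ≥ start whose header is among ps (the value A's inner loop records)
def pvFirstIdx (ps : List String) : List String → Int → Option Int
  | [], _ => none
  | h :: t, i => if ps.contains h then some i else pvFirstIdx ps t (i + 1)

theorem pvScanA_eq (f : String) (ps : List String) :
    ∀ (hs : List String) (i : Int) (cm : PySem.Dict String Int),
      pvScanA cm f ps hs i =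
        match pvFirstIdx ps hs i with
        | some j => cm.insert f j
        | none => cm := by
  intro hs
  induction hs with
  | nil => intro i cm; simp [pvScanA, pvFirstIdx]
  | cons h t ih =>
      intro i cm
      simp only [pvScanA, pvFirstIdx]
      by_cases hc : h ∈ ps
      · simp [hc]
      · simp [hc, ih]

-- the reverse table as a flat association list (the dict-comprehension literally appends
-- one (pattern, field) pair per pattern, all keys distinct)
theorem pvReverse_mk :
    pvReverse = PySem.Dict.mk (pvHeaderMappings.flatMap (fun fp => fp.2.map (fun p => (p, fp.1)))) := by
  decide

theorem pvGet_mk_find (l : List (String × String)) (h : String) :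
    (PySem.Dict.mk l).get? h = (l.find? (fun q => q.1 == h)).map (·.2) := by
  induction l with
  | nil => simp [PySem.Dict.get?]
  | cons q t ih =>
      rw [show PySem.Dict.mk (q :: t) = PySem.Dict.mk ((q.1, q.2) :: t) by rfl,
          PySem.Dict.get?_mk_cons]
      by_cases hq : q.1 == h
      · simp [List.find?, hq]
      · simp [List.find?, hq, ih]

theorem pvFind_flat (L : List (String × List String)) (h : String) :
    ((L.flatMap (fun fp => fp.2.map (fun p => (p, fp.1)))).find? (fun q => q.1 == h)).map (·.2)
      = (L.find? (fun fp => fp.2.contains h)).map (·.1) := by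
  induction L with
  | nil => simp
  | cons fp t ih =>
      simp only [List.flatMap_cons, List.find?_append]
      have hmap : (fp.2.map (fun p => (p, fp.1))).find? (fun q => q.1 == h)
          = (fp.2.find? (fun p => p == h)).map (fun p => (p, fp.1)) := by
        rw [List.find?_map]; rfl
      rw [hmap]
      rcases hfind : fp.2.find? (fun p => p == h) with _ | p
      · have hc : fp.2.contains h = false := by
          rw [List.find?_eq_none] at hfind
          by_contra hcc
          have hm : h ∈ fp.2 := List.contains_iff_mem.mp (Bool.not_eq_false _ ▸ hcc)
          exact absurd (by simp : (h == h) = true) (by simpa using hfind h hm)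
        rw [List.find?_cons_of_neg (p := fun q : String × List String => q.2.contains h)
              (a := fp) (l := t) (by simp only [hc]; simp)]
        simpa using ih
      · have hph : p = h := by simpa using List.find?_some hfind
        have hpm : h ∈ fp.2 := hph ▸ List.mem_of_find?_eq_some hfind
        have hc : fp.2.contains h = true := List.contains_iff_mem.mpr hpm
        rw [List.find?_cons_of_pos (p := fun q : String × List String => q.2.contains h)
              (a := fp) (l := t) hc]
        simp [hph]

-- the lookup B's single pass does, characterised as A's field-by-field membership scan
theorem pvRevGet (h : String) :
    pvReverse.get? h =
      (pvHeaderMappings.find? (fun fp => fp.2.contains h)).map (·.1) := by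
  rw [pvReverse_mk, pvGet_mk_find, pvFind_flat]

theorem pvFind_some_iff (f : String) (ps : List String) (h : String) :
    ∀ (L : List (String × List String)), (L.map (·.1)).Nodup →
      (L.flatMap (·.2)).Nodup → (f, ps) ∈ L →
      (((L.find? (fun fp => fp.2.contains h)).map (·.1) = some f) ↔ ps.contains h = true) := by
  intro L
  induction L with
  | nil => intro _ _ hm; cases hm
  | cons fp t ih =>
      intro hk hd hm
      simp only [List.map_cons, List.nodup_cons] at hk
      simp only [List.flatMap_cons, List.nodup_append] at hd
      by_cases hc : fp.2.contains h = true
      · rw [List.find?_cons_of_pos (p := fun q : String × List String => q.2.contains h)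
              (a := fp) (l := t) hc]
        rcases List.mem_cons.mp hm with rfl | hmt
        · simp [List.contains_iff_mem.mp hc]
        · constructor
          · intro he
            have hfe : fp.1 = f := by simpa using he
            exact absurd (List.mem_map.mpr ⟨(f, ps), hmt, rfl⟩) (hfe ▸ hk.1)
          · intro hps
            exact absurd rfl (hd.2.2 h (List.contains_iff_mem.mp hc) h
              (List.mem_flatMap.mpr ⟨(f, ps), hmt, List.contains_iff_mem.mp hps⟩))
      · rw [List.find?_cons_of_neg (p := fun q : String × List String => q.2.contains h)
              (a := fp) (l := t) hc]
        rcases List.mem_cons.mp hm with rfl | hmt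
        · rw [Bool.not_eq_true] at hc
          rw [hc]
          simp only [iff_false, Bool.false_eq_true]
          intro he
          obtain ⟨fp', hfp'1, hfp'2⟩ := Option.map_eq_some_iff.mp he
          exact hk.1 (hfp'2 ▸ List.mem_map.mpr ⟨fp', List.mem_of_find?_eq_some hfp'1, rfl⟩)
        · exact ih hk.2 hd.2.1 hmt

theorem pvRevGet_some_iff (h f : String) (ps : List String)
    (hm : (f, ps) ∈ pvHeaderMappings) :
    pvReverse.get? h = some f ↔ ps.contains h = true := by
  rw [pvRevGet]
  exact pvFind_some_iff f ps h pvHeaderMappings (by decide) (by decide) hm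

theorem pvScanB_get (f : String) (ps : List String)
    (hm : (f, ps) ∈ pvHeaderMappings) :
    ∀ (hs : List String) (i : Int) (fd : PySem.Dict String Int),
      (pvScanB fd hs i).get? f =
        match fd.get? f with
        | some v => some v
        | none => pvFirstIdx ps hs i := by
  intro hs
  induction hs with
  | nil =>
      intro i fd
      simp only [pvScanB, pvFirstIdx]
      cases fd.get? f <;> rfl
  | cons h t ih =>
      intro i fd
      simp only [pvScanB, pvFirstIdx]
      rcases hrev : pvReverse.get? h with _ | g
      · have hcm : h ∉ ps := fun hmm => by
          have := (pvRevGet_some_iff h f ps hm).mpr (List.contains_iff_mem.mpr hmm)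
          rw [hrev] at this; cases this
        rw [ih (i + 1) fd]
        cases fd.get? f <;> simp [hcm]
      · dsimp only
        by_cases hgf : g = f
        · subst hgf
          have hcm : h ∈ ps :=
            List.contains_iff_mem.mp ((pvRevGet_some_iff h g ps hm).mp hrev)
          rcases hfd : fd.get? g with _ | v
          · have hcont : fd.contains g = false := by
              rw [PySem.Dict.contains_eq_isSome_get?, hfd]; rfl
            rw [hcont]
            simp only [Bool.false_eq_true, if_false]
            rw [ih (i + 1) (fd.insert g i), PySem.Dict.get?_insert_self]
            simp [hcm]
          · have hcont : fd.contains g = true := by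
              rw [PySem.Dict.contains_eq_isSome_get?, hfd]; rfl
            rw [hcont]
            simp only [if_true]
            rw [ih (i + 1) fd]
            simp [hfd]
        · have hcm : h ∉ ps := fun hmm => by
            have := (pvRevGet_some_iff h f ps hm).mpr (List.contains_iff_mem.mpr hmm)
            rw [hrev] at this
            exact hgf (by simpa using this : (g : String) = f)
          by_cases hcont : fd.contains g = true
          · rw [if_pos hcont, ih (i + 1) fd]
            cases fd.get? f <;> simp [hcm]
          · rw [if_neg hcont, ih (i + 1) (fd.insert g i),
                PySem.Dict.get?_insert_of_ne _ _ (fun he => hgf he.symm)]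
            cases fd.get? f <;> simp [hcm]

-- ===== VERDICT (by name: the statement is the Claim_ definition above) =====
theorem map_table_columns_py_spec : Claim_equal_map_table_columns_py := by
  intro headers _
  unfold Spec_map_table_columns_py map_table_columns_py map_table_columns_py_alt
  simp only []
  congr 1
  apply PySem.List.foldl_congr_mem
  intro cm fp hfp
  rw [pvScanA_eq fp.1 fp.2 headers 0,
      pvScanB_get fp.1 fp.2 (by simpa using hfp) headers 0 PySem.Dict.empty,
      PySem.Dict.get?_empty]
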